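-- pv_equiv track=rewrite | github.com/alex-schaaf/adventofcode2023 | day05/main.py | parse
-- ===== SOURCE A (Python) =====
-- def parse(lines: list[str]) -> dict[str, list[tuple[int, int, int]]]:
--     categories = {}
--
--     for line in lines[2:]:
--         if len(line) == 0:
--             continue
--         elif line[0].isalpha():
--             category = line.split()[0]
--             categories[category] = []
--         elif line[0].isdigit():
--             start_dest, start_source, length = (int(i) for i in line.split())
--             categories[category].append((start_dest, start_source, length))
--     return categories
-- ===== SOURCE B (Python) =====
-- def parse(lines: list[str]) -> dict[str, list[tuple[int, int, int]]]:
--     rest = lines[2:]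
--     # positions of the header (alphabetic) lines, computed once, no carried state
--     starts = [i for i, line in enumerate(rest) if line and line[0].isalpha()]
--     ends = starts[1:] + [len(rest)]
--     return {
--         rest[s].split()[0]: [
--             tuple(int(t) for t in line.split())
--             for line in rest[s + 1:e]
--             if line and line[0].isdigit()
--         ]
--         for s, e in zip(starts, ends)
--     }
-- ===== Notes on version B (the rewrite author's own statement) =====
-- stated objective: alternative
-- what changed: Replaces A's single stateful scan (a 'current category' variable with per-line dict mutation) by an index-based join: compute the positions of all header lines once with enumerate, pair each with the next header's position, and build the dict in one comprehension by slicing out each section and parsing its digit lines.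
import Mathlib
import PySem

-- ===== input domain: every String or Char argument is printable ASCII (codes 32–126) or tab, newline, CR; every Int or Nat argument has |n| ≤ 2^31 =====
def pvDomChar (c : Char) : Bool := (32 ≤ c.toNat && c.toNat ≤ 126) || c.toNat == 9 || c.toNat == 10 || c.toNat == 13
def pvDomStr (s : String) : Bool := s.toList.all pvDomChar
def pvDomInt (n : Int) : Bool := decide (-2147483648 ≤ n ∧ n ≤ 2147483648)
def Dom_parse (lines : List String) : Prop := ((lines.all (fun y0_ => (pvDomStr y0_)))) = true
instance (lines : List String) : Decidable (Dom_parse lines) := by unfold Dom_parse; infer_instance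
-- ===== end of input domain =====

-- B replaces A's single stateful scan (current-category variable + per-line dict
-- mutation) by an index-based join: enumerate the header positions once, pair each with
-- the next, and build the dict by slicing out each section (objective: alternative).


-- ===== PORT A =====
-- shared helper: '(int(i) for i in line.split())' unpacked into a 3-tuple; both Pythons
-- compute exactly this; the `_ => (0,0,0)` arm is Python's ValueError, excluded by Pre_parse
def pyTriple (line : String) : Int × Int × Int :=
  match (PySem.Str.split₀ line).map PySem.Int.ofStr? with
  | [some a, some b, some c] => (a, b, c)
  | _ => (0, 0, 0)

-- shared helpers for the tests 'line and line[0].isalpha()' / '…isdigit()'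
def headerB (line : String) : Bool :=
  match line.toList with
  | [] => false
  | c :: _ => PySem.Chars.isalpha c

def digitB (line : String) : Bool :=
  match line.toList with
  | [] => false
  | c :: _ => PySem.Chars.isdigit c

-- one iteration of A's for-loop; state = (categories, current category)
def parseStep (st : PySem.Dict String (List (Int × Int × Int)) × Option String)
    (line : String) : PySem.Dict String (List (Int × Int × Int)) × Option String :=
  match line.toList with
  | [] => st
  | c :: _ =>
    if PySem.Chars.isalpha c then
      let category := (PySem.Str.split₀ line).headD ""
      (st.1.insert category [], some category)
    else if PySem.Chars.isdigit c then
      match st.2 with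
      | some category => (st.1.modify category [] (· ++ [pyTriple line]), st.2)
      | none => st      -- Python: UnboundLocalError ('category' unbound), excluded by Pre_parse
    else st

def parse (lines : List String) : List (String × List (Int × Int × Int)) :=
  ((PySem.List.slice lines (some 2) none).foldl parseStep (PySem.Dict.empty, none)).1.items

-- ===== PORT B =====
-- Source B: starts = header positions from enumerate; ends = starts[1:] + [len(rest)];
-- the dict comprehension over zip(starts, ends) slices each section out of rest.
-- rest[s] is ported as pyGetD (s comes from enumerate, so it is always in range).
def parse_alt (lines : List String) : List (String × List (Int × Int × Int)) :=
  let rest := PySem.List.slice lines (some 2) none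
  let starts := ((PySem.List.enumerate rest).filter (fun p => headerB p.2)).map Prod.fst
  let ends := starts.tail ++ [(rest.length : Int)]
  ((starts.zip ends).foldl (fun d p =>
      d.insert ((PySem.Str.split₀ (PySem.List.pyGetD rest p.1 "")).headD "")
        (((PySem.List.slice rest (some (p.1 + 1)) (some p.2)).filter
            (fun line => digitB line)).map pyTriple))
    PySem.Dict.empty).items

-- ===== PRECONDITION & SPEC =====
-- Pre_parse excludes exactly the inputs on which A raises: a digit line whose tokens are
-- not exactly three Python ints (ValueError), and a digit line before the first header
-- line in lines[2:] (UnboundLocalError: 'category' is unbound there).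
def Pre_parse (lines : List String) : Prop :=
  (∀ l ∈ (PySem.List.slice lines (some 2) none), digitB l = true →
      (PySem.Str.split₀ l).length = 3 ∧
        ∀ t ∈ PySem.Str.split₀ l, (PySem.Int.ofStr? t).isSome = true) ∧
  (∀ l ∈ (PySem.List.slice lines (some 2) none).takeWhile (fun x => !headerB x),
      digitB l = false)
instance (lines : List String) : Decidable (Pre_parse lines) := by unfold Pre_parse; infer_instance

def pvWitness_parse : List String := ["seeds: 79 14", "", "seed-to-soil map:", "50 98 2", "", "52 50 48"]

def Spec_parse (lines : List String) (out : List (String × List (Int × Int × Int))) : Prop := out = parse_alt lines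
instance (lines : List String) (out : List (String × List (Int × Int × Int))) : Decidable (Spec_parse lines out) := by unfold Spec_parse; infer_instance

-- ===== CLAIM (what is proved, stated in full; the proofs are below) =====
def Claim_equal_parse : Prop := ∀ (lines : List String), Dom_parse lines → Pre_parse lines → Spec_parse lines (parse lines)

-- ===== LEMMAS AND PROOFS =====

-- proof-only helpers: the common recursive characterisation both ports are reduced to.
-- segAux rest key body = the (key, digit-lines) segments of rest given current header key
def segAux : List String → String → List String → List (String × List String)
  | [], key, body => [(key, body)]
  | l :: rest, key, body =>
    if headerB l then
      (key, body) :: segAux rest ((PySem.Str.split₀ l).headD "") []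
    else if digitB l then segAux rest key (body ++ [l])
    else segAux rest key body

def segmentsB : List String → List (String × List String)
  | [] => []
  | l :: rest =>
    if headerB l then segAux rest ((PySem.Str.split₀ l).headD "") []
    else segmentsB rest

-- keyOf l = line.split()[0]
def keyOf (l : String) : String := (PySem.Str.split₀ l).headD ""

-- startsOf rest = B's 'starts' list; endsOf = B's 'ends'
def startsOf (rest : List String) : List Int :=
  ((PySem.List.enumerate rest).filter (fun p => headerB p.2)).map Prod.fst

def endsOf (rest : List String) : List Int := (startsOf rest).tail ++ [(rest.length : Int)]

-- B's per-pair dict entry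
def entryOf (rest : List String) (p : Int × Int) : String × List (Int × Int × Int) :=
  ((PySem.Str.split₀ (PySem.List.pyGetD rest p.1 "")).headD "",
    ((PySem.List.slice rest (some (p.1 + 1)) (some p.2)).filter
        (fun line => digitB line)).map pyTriple)

-- d[k] = v; d[k].append(x)  ≡  d[k] = v ++ [x]
theorem insert_modify_append (d : PySem.Dict String (List (Int × Int × Int))) (k : String)
    (v : List (Int × Int × Int)) (x : Int × Int × Int) :
    (d.insert k v).modify k [] (· ++ [x]) = d.insert k (v ++ [x]) := by
  simp [PySem.Dict.modify, PySem.Dict.getD_insert_self, PySem.Dict.insert_insert_self]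

-- A-side: inside a segment, A's loop with current category `key` computes, on the rest
-- of the lines, exactly the fold over the segments that segAux still produces.
theorem segAux_spec (rest : List String) : ∀ (key : String) (body : List String)
    (d : PySem.Dict String (List (Int × Int × Int))),
    (rest.foldl parseStep (d.insert key (body.map pyTriple), some key)).1
      = (segAux rest key body).foldl (fun d seg => d.insert seg.1 (seg.2.map pyTriple)) d := by
  induction rest with
  | nil => intro key body d; simp [segAux]
  | cons l rest ih =>
    intro key body d
    cases hl : l.toList with
    | nil =>
      have hh : headerB l = false := by simp [headerB, hl]
      have hd : digitB l = false := by simp [digitB, hl]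
      simp only [List.foldl_cons, parseStep, hl, segAux, hh, hd, Bool.false_eq_true,
        if_false]
      exact ih key body d
    | cons c cs =>
      by_cases ha : PySem.Chars.isalpha c = true
      · have hh : headerB l = true := by simp [headerB, hl, ha]
        simp only [List.foldl_cons, parseStep, hl, ha, if_true, segAux, hh]
        have := ih ((PySem.Str.split₀ l).headD "") [] (d.insert key (body.map pyTriple))
        simpa using this
      · have hh : headerB l = false := by simp [headerB, hl, ha]
        by_cases hd : PySem.Chars.isdigit c = true
        · have hdB : digitB l = true := by simp [digitB, hl, hd]
          simp only [List.foldl_cons, parseStep, hl, ha, hd, Bool.false_eq_true, if_false,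
            if_true, segAux, hh, hdB]
          rw [insert_modify_append]
          have := ih key (body ++ [l]) d
          simpa using this
        · have hdB : digitB l = false := by simp [digitB, hl, hd]
          simp only [List.foldl_cons, parseStep, hl, ha, hd, Bool.false_eq_true, if_false,
            segAux, hh, hdB]
          exact ih key body d

-- A-side, whole run: provided no digit line precedes the first header, A's stateful scan
-- equals the fold over the segments.
theorem foldl_parseStep_spec (rest : List String) :
    ∀ (d : PySem.Dict String (List (Int × Int × Int))) (c : Option String),
    (∀ l ∈ rest.takeWhile (fun x => !headerB x), digitB l = false) →
    (rest.foldl parseStep (d, c)).1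
      = (segmentsB rest).foldl (fun d seg => d.insert seg.1 (seg.2.map pyTriple)) d := by
  induction rest with
  | nil => intro d c _; simp [segmentsB]
  | cons l rest ih =>
    intro d c hnd
    by_cases hh : headerB l = true
    · obtain ⟨cc, cs, hl⟩ : ∃ cc cs, l.toList = cc :: cs := by
        unfold headerB at hh
        cases hl : l.toList with
        | nil => rw [hl] at hh; simp at hh
        | cons cc cs => exact ⟨cc, cs, rfl⟩
      have ha : PySem.Chars.isalpha cc = true := by
        unfold headerB at hh; rw [hl] at hh; exact hh
      simp only [List.foldl_cons, parseStep, hl, ha, if_true, segmentsB, hh]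
      have := segAux_spec rest ((PySem.Str.split₀ l).headD "") [] d
      simpa using this
    · have hmem : l ∈ (l :: rest).takeWhile (fun x => !headerB x) := by
        simp [hh]
      have hdB : digitB l = false := hnd l hmem
      have hstep : parseStep (d, c) l = (d, c) := by
        cases hl : l.toList with
        | nil => simp [parseStep, hl]
        | cons cc cs =>
          have ha : PySem.Chars.isalpha cc = false := by
            by_contra h
            exact hh (by simp [headerB, hl]; simpa using h)
          have hd : PySem.Chars.isdigit cc = false := by
            have := hdB; simp [digitB, hl] at this; exact this
          simp [parseStep, hl, ha, hd]
      have hnd' : ∀ l' ∈ rest.takeWhile (fun x => !headerB x), digitB l' = false := by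
        intro l' hl'
        exact hnd l' (by simp [hh]; exact Or.inr hl')
      simp only [List.foldl_cons, hstep, segmentsB, hh, Bool.false_eq_true, if_false]
      exact ih d c hnd'

-- B-side lemmas -------------------------------------------------------------

theorem enumerate_shift (xs : List String) : ∀ s : Int,
    PySem.List.enumerate xs (s + 1) = (PySem.List.enumerate xs s).map (fun p => (p.1 + 1, p.2)) := by
  induction xs with
  | nil => intro s; simp [PySem.List.enumerate_nil]
  | cons x xs ih => intro s; simp [PySem.List.enumerate_cons, ih]

theorem startsOf_cons (l : String) (rest : List String) :
    startsOf (l :: rest)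
      = (if headerB l then [(0 : Int)] else []) ++ (startsOf rest).map (· + 1) := by
  unfold startsOf
  rw [PySem.List.enumerate_cons, enumerate_shift]
  rw [List.filter_cons, List.filter_map]
  by_cases hh : headerB l = true
  · simp only [hh, if_true, List.singleton_append, List.map_cons, List.map_map]
    rfl
  · simp only [hh, Bool.false_eq_true, if_false, List.nil_append, List.map_map]
    rfl

theorem startsOf_nonneg (rest : List String) : ∀ s ∈ startsOf rest, 0 ≤ s := by
  intro s hs
  unfold startsOf at hs
  obtain ⟨p, hp, rfl⟩ := List.mem_map.mp hs
  have := List.mem_filter.mp hp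
  obtain ⟨k, hk, rfl⟩ := (PySem.List.mem_enumerate_iff _ _ _).mp this.1
  simp

theorem endsOf_nonneg (rest : List String) : ∀ e ∈ endsOf rest, 0 ≤ e := by
  intro e he
  unfold endsOf at he
  rcases List.mem_append.mp he with h | h
  · exact startsOf_nonneg rest e (List.mem_of_mem_tail h)
  · simp at h; omega

-- first-header characterisation: taking up to the first header is takeWhile ¬header
theorem take_starts (rest : List String) :
    rest.take ((startsOf rest).headD (rest.length : Int)).toNat
      = rest.takeWhile (fun x => !headerB x) := by
  induction rest with
  | nil => simp
  | cons l rest ih =>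
    rw [startsOf_cons]
    by_cases hh : headerB l = true
    · simp [hh, List.takeWhile_cons]
    · simp only [hh, Bool.false_eq_true, if_false, List.nil_append]
      have hhead : (((startsOf rest).map (· + 1)).headD ((l :: rest).length : Int)).toNat
          = ((startsOf rest).headD (rest.length : Int)).toNat + 1 := by
        cases h : startsOf rest with
        | nil => simp [h]
        | cons s ss =>
          have hs : 0 ≤ s := startsOf_nonneg rest s (by simp [h])
          simp [h]; omega
      rw [hhead, List.take_succ_cons, List.takeWhile_cons, if_pos (by simp [hh]), ih]

-- shifting one line off the front: each B entry over (l :: rest) at a shifted pair is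
-- the entry over rest at the original pair
theorem entryOf_shift (l : String) (rest : List String) (p : Int × Int)
    (hs : 0 ≤ p.1) (he : 0 ≤ p.2) :
    entryOf (l :: rest) (p.1 + 1, p.2 + 1) = entryOf rest p := by
  have hget : PySem.List.pyGetD (l :: rest) (p.1 + 1) "" = PySem.List.pyGetD rest p.1 "" := by
    have h1 : p.1 + 1 = ((p.1.toNat + 1 : Nat) : Int) := by omega
    have h2 : p.1 = ((p.1.toNat : Nat) : Int) := by omega
    rw [h1, PySem.List.pyGetD_natCast, h2, PySem.List.pyGetD_natCast]
    simp
    rw [show (max p.1 0).toNat = p.1.toNat from by omega]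
  have hslice : PySem.List.slice (l :: rest) (some (p.1 + 1 + 1)) (some (p.2 + 1))
      = PySem.List.slice rest (some (p.1 + 1)) (some p.2) := by
    rw [PySem.List.slice_toNat _ (by omega) (by omega),
        PySem.List.slice_toNat _ (by omega) (by omega)]
    have e1 : (p.1 + 1 + 1).toNat = (p.1 + 1).toNat + 1 := by omega
    have e2 : (p.2 + 1).toNat = p.2.toNat + 1 := by omega
    rw [e1, e2, List.drop_succ_cons]
    congr 1
    omega

  unfold entryOf
  simp only [hget, hslice]

theorem map_entryOf_shift (l : String) (rest : List String) (Z : List (Int × Int))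
    (hZ : ∀ p ∈ Z, 0 ≤ p.1 ∧ 0 ≤ p.2) :
    (Z.map (fun p => (p.1 + 1, p.2 + 1))).map (entryOf (l :: rest)) = Z.map (entryOf rest) := by
  rw [List.map_map]
  apply List.map_congr_left
  intro p hp
  exact entryOf_shift l rest p (hZ p hp).1 (hZ p hp).2

-- segAux unfolded to takeWhile/dropWhile
theorem segAux_eq (rest : List String) : ∀ (key : String) (body : List String),
    segAux rest key body
      = (key, body ++ (rest.takeWhile (fun x => !headerB x)).filter digitB)
          :: segmentsB (rest.dropWhile (fun x => !headerB x)) := by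
  induction rest with
  | nil => intro key body; simp [segAux, segmentsB]
  | cons l rest ih =>
    intro key body
    by_cases hh : headerB l = true
    · simp [segAux, hh, List.takeWhile_cons, List.dropWhile_cons, segmentsB]
    · by_cases hd : digitB l = true
      · simp only [segAux, hh, Bool.false_eq_true, if_false, hd, if_true,
          List.takeWhile_cons, List.dropWhile_cons]
        simp [hh, hd, ih]
      · simp only [segAux, hh, Bool.false_eq_true, if_false, hd, if_false,
          List.takeWhile_cons, List.dropWhile_cons]
        simp [hh, hd, ih]

theorem segmentsB_dropWhile (rest : List String) :
    segmentsB (rest.dropWhile (fun x => !headerB x)) = segmentsB rest := by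
  induction rest with
  | nil => simp
  | cons l rest ih =>
    by_cases hh : headerB l = true
    · simp [List.dropWhile_cons, hh]
    · simp [List.dropWhile_cons, hh, ih, segmentsB]

-- the central B-side equality: B's mapped zip list IS the segment list (triples parsed)
theorem mapped_eq (rest : List String) :
    ((startsOf rest).zip (endsOf rest)).map (entryOf rest)
      = (segmentsB rest).map (fun seg => (seg.1, seg.2.map pyTriple)) := by
  induction rest with
  | nil => simp [startsOf, endsOf, segmentsB, PySem.List.enumerate_nil]
  | cons l rest ih =>
    have hZ : ∀ p ∈ (startsOf rest).zip (endsOf rest), 0 ≤ p.1 ∧ 0 ≤ p.2 := by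
      intro p hp
      obtain ⟨h1, h2⟩ := List.of_mem_zip hp
      exact ⟨startsOf_nonneg rest p.1 h1, endsOf_nonneg rest p.2 h2⟩
    by_cases hh : headerB l = true
    · -- header: head pair (0, c+1) with c the first header position of rest (or len);
      -- tail = the zip of rest with both components shifted by one
      have hstarts : startsOf (l :: rest) = 0 :: (startsOf rest).map (· + 1) := by
        rw [startsOf_cons, hh]; simp
      have hc : 0 ≤ (startsOf rest).headD (rest.length : Int) := by
        cases h : startsOf rest with
        | nil => simp [h]
        | cons s ss =>
          simp only [List.headD_cons]
          exact startsOf_nonneg rest s (by rw [h]; simp)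
      have hzip : (startsOf (l :: rest)).zip (endsOf (l :: rest))
          = ((0 : Int), (startsOf rest).headD (rest.length : Int) + 1)
              :: ((startsOf rest).zip (endsOf rest)).map (fun p => (p.1 + 1, p.2 + 1)) := by
        unfold endsOf
        rw [hstarts]
        cases h : startsOf rest with
        | nil => simp [h]
        | cons s ss =>
          simp only [h, List.map_cons, List.tail_cons, List.zip_cons_cons, List.headD_cons]
          congr 1
          rw [show (fun p : Int × Int => (p.1 + 1, p.2 + 1)) = Prod.map (· + 1) (· + 1) from
                funext fun p => by cases p; rfl]
          rw [← List.zip_map]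
          congr 1
          simp [List.map_append]
      have hhead : entryOf (l :: rest) ((0 : Int), (startsOf rest).headD (rest.length : Int) + 1)
          = (keyOf l, ((rest.takeWhile (fun x => !headerB x)).filter digitB).map pyTriple) := by
        unfold entryOf keyOf
        rw [show (((0 : Int), (startsOf rest).headD (rest.length : Int) + 1)).1 = (0 : Int) from rfl,
            show (((0 : Int), (startsOf rest).headD (rest.length : Int) + 1)).2
              = (startsOf rest).headD (rest.length : Int) + 1 from rfl]
        rw [PySem.List.pyGetD_zero_cons]
        rw [PySem.List.slice_toNat _ (by omega) (by omega)]
        rw [show ((0 : Int) + 1).toNat = 1 from rfl]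
        rw [show ((startsOf rest).headD (rest.length : Int) + 1).toNat - 1
              = ((startsOf rest).headD (rest.length : Int)).toNat from by omega]
        rw [show List.drop 1 (l :: rest) = rest from rfl]
        rw [take_starts]
      have hseg : segmentsB (l :: rest) = segAux rest (keyOf l) [] := by
        simp [segmentsB, hh, keyOf]
      rw [hzip, List.map_cons, hhead, hseg, segAux_eq, segmentsB_dropWhile,
          List.map_cons, map_entryOf_shift l rest _ hZ, ih]
      simp
    · -- non-header: everything shifts by one
      have hstarts : startsOf (l :: rest) = (startsOf rest).map (· + 1) := by
        rw [startsOf_cons]; simp [hh]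
      have hends : endsOf (l :: rest) = (endsOf rest).map (· + 1) := by
        unfold endsOf
        rw [hstarts]
        cases hS : startsOf rest with
        | nil =>
          simp [hS]
        | cons s ss =>
          simp [hS, List.map_append]
      rw [hstarts, hends, List.zip_map, List.map_map]
      have : ((startsOf rest).zip (endsOf rest)).map
            ((entryOf (l :: rest)) ∘ Prod.map (· + 1) (· + 1))
          = ((startsOf rest).zip (endsOf rest)).map (entryOf rest) := by
        apply List.map_congr_left
        intro p hp
        have := hZ p hp
        simpa [Prod.map] using entryOf_shift l rest p this.1 this.2
      rw [this, ih]
      have : segmentsB (l :: rest) = segmentsB rest := by simp [segmentsB, hh]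
      rw [this]

-- ===== VERDICT (by name: the statement is the Claim_ definition above) =====
theorem parse_spec : Claim_equal_parse := by
  intro lines _ hpre
  unfold Spec_parse parse parse_alt
  rw [foldl_parseStep_spec _ _ _ hpre.2]
  have h := congrArg
    (fun L : List (String × List (Int × Int × Int)) =>
      (L.foldl (fun (d : PySem.Dict String (List (Int × Int × Int))) kv =>
          d.insert kv.1 kv.2) PySem.Dict.empty).items)
    (mapped_eq (PySem.List.slice lines (some 2) none))
  simp only [List.foldl_map] at h
  rw [← h]
  simp [entryOf, startsOf, endsOf]
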